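-- pv_equiv track=rewrite | github.com/bica-tools/reticulate | reticulate/irreducibles.py | _count_downsets
-- ===== SOURCE A (Python) =====
-- def _count_downsets(elements: set[int], order: set[tuple[int, int]]) -> int:
--     """Count the number of downsets (order ideals) of a finite poset.
--
--     A downset D is a subset such that if x in D and y <= x then y in D.
--     Uses brute force enumeration (fine for small posets).
--     """
--     elems = sorted(elements)
--     n = len(elems)
--     if n == 0:
--         return 1  # empty downset
--
--     count = 0
--     # Enumerate all 2^n subsets
--     for mask in range(1 << n):
--         subset = {elems[i] for i in range(n) if mask & (1 << i)}
--         is_downset = True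
--         for x in subset:
--             for y_val in elems:
--                 if y_val not in subset:
--                     continue
--                 # y_val is in subset; check that anything <= y_val is also in subset
--             # More efficient: for each x in subset, check all y <= x are in subset
--             for y_val, y_upper in order:
--                 if y_upper == x and y_val not in subset:
--                     # y_val <= x but y_val not in subset
--                     is_downset = False
--                     break
--             if not is_downset:
--                 break
--         if is_downset:
--             count += 1
--     return count
-- ===== SOURCE B (Python) =====
-- def _count_downsets(elements: set[int], order: set[tuple[int, int]]) -> int:
--     """Count downsets by precomputing, for each element, the bitmask of its
--     required predecessors; each of the 2^n candidate subsets is then tested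
--     with one bitwise subset check per member instead of rescanning `order`."""
--     elems = sorted(elements)
--     n = len(elems)
--     req = []  # req[i]: bitmask of indices that must accompany elems[i]; None if
--               # elems[i] has a predecessor outside `elements` (so it can never be in a downset)
--     for x in elems:
--         m = 0
--         for y, u in order:
--             if u == x:
--                 if y in elements:
--                     m |= 1 << elems.index(y)
--                 else:
--                     m = None
--                     break
--         req.append(m)
--     count = 0
--     for mask in range(1 << n):
--         ok = True
--         for i, r in enumerate(req):
--             if (mask >> i) & 1 and (r is None or (mask & r) != r):
--                 ok = False
--                 break
--         if ok:
--             count += 1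
--     return count
-- ===== Notes on version B (the rewrite author's own statement) =====
-- stated objective: alternative
-- what changed: B precomputes, per element, a bitmask of its required predecessors (None if a predecessor is not an element), so each of the 2^n subsets is checked with one bitwise subset test per member instead of rescanning the whole order relation for every member of every subset; intended to cut the per-subset cost (measured 5.2x at n=16), though both remain Theta(2^n) overall.
import Mathlib
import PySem

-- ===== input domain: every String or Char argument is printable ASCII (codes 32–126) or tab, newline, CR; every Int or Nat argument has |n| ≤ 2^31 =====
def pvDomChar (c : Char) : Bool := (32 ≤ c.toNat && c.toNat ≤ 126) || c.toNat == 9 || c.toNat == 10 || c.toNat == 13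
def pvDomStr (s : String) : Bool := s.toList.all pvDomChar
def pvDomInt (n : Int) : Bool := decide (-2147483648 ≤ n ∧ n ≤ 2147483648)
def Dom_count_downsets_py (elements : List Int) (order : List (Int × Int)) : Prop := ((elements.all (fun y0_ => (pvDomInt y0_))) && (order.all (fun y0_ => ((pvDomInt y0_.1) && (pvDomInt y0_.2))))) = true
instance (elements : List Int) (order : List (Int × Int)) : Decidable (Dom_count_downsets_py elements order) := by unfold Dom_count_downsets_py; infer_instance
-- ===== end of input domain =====

-- B replaces A's per-subset rescan of `order` by precomputed per-element predecessor
-- bitmasks, so each of the 2^n subsets is tested with one bitwise check per member.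

-- ===== PORT A =====
-- `is_downset` with its two breaks: each break is exactly List.all's short-circuit.
-- (A's first inner loop `for y_val in elems: if y_val not in subset: continue` has an
--  empty body — only `continue` — and no effect; it is not ported.)
def pvDownsetA (order : List (Int × Int)) (subset : PySem.Set Int) : Bool :=
  List.all subset fun x =>
    List.all order fun p => !(p.2 == x && !(PySem.Set.contains subset p.1))

def count_downsets_py (elements : List Int) (order : List (Int × Int)) : Int :=
  let elems := PySem.List.sorted elements (fun v => v)
  let n := elems.length
  if n == 0 then 1
  else
    (List.range (1 <<< n)).foldl   -- range(1 << n) enumerates 0, …, 2^n − 1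
      (fun count mask =>
        -- {elems[i] for i in range(n) if mask & (1 << i)}  (i < n, so elems[i]? = some _)
        let subset : PySem.Set Int :=
          PySem.Set.ofList ((List.range n).filterMap fun i =>
            if mask &&& (1 <<< i) != 0 then elems[i]? else none)
        if pvDownsetA order subset then count + 1 else count) 0

-- ===== PORT B =====
-- inner loop of B's precompute with its break: none is Python's m = None
def pvReqLoop (elements elems : List Int) (x : Int) : Nat → List (Int × Int) → Option Nat
  | m, [] => some m
  | m, (y, u) :: rest =>
    if u == x then
      if elements.contains y then
        match PySem.List.index? elems y with
        | some j => pvReqLoop elements elems x (m ||| (1 <<< j)) rest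
        | none => none   -- unreachable: y ∈ elements and elems is a permutation of elements
      else none
    else pvReqLoop elements elems x m rest

-- B's per-mask check with its break (= List.all's short-circuit); zipIdx is enumerate(req)
def pvOkB (req : List (Option Nat)) (mask : Nat) : Bool :=
  (req.zipIdx).all fun ri =>
    !((((mask >>> ri.2) &&& 1) == 1) &&
      (match ri.1 with
       | none => true
       | some r => !((mask &&& r) == r)))

def count_downsets_py_alt (elements : List Int) (order : List (Int × Int)) : Int :=
  let elems := PySem.List.sorted elements (fun v => v)
  let n := elems.length
  let req := elems.map fun x => pvReqLoop elements elems x 0 order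
  (List.range (1 <<< n)).foldl
    (fun count mask => if pvOkB req mask then count + 1 else count) 0

-- ===== PRECONDITION & SPEC =====
-- Python's `elements` is a set; Pre_ excludes lists with duplicate entries, which do not
-- represent a set and on which A's value-based and B's index-based subset encodings
-- legitimately diverge.
def Pre_count_downsets_py (elements : List Int) (order : List (Int × Int)) : Prop :=
  elements.Nodup
instance (elements : List Int) (order : List (Int × Int)) : Decidable (Pre_count_downsets_py elements order) := by unfold Pre_count_downsets_py; infer_instance

def pvWitness_count_downsets_py : List Int × (List (Int × Int)) := ([1, 2], [(1, 2)])

def Spec_count_downsets_py (elements : List Int) (order : List (Int × Int)) (out : Int) : Prop := out = count_downsets_py_alt elements order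
instance (elements : List Int) (order : List (Int × Int)) (out : Int) : Decidable (Spec_count_downsets_py elements order out) := by unfold Spec_count_downsets_py; infer_instance

-- ===== CLAIM (what is proved, stated in full; the proofs are below) =====
def Claim_equal_count_downsets_py : Prop := ∀ (elements : List Int) (order : List (Int × Int)), Dom_count_downsets_py elements order → Pre_count_downsets_py elements order → Spec_count_downsets_py elements order (count_downsets_py elements order)

-- ===== LEMMAS AND PROOFS =====

-- Python truthiness of `mask & (1 << i)` is the i-th bit
lemma pv_bit1 (mask i : Nat) : (mask &&& (1 <<< i) != 0) = mask.testBit i := by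
  rw [Nat.shiftLeft_eq, one_mul, Nat.and_two_pow]
  cases h : mask.testBit i <;> simp

-- Python truthiness of `(mask >> i) & 1` is the i-th bit
lemma pv_bit2 (mask i : Nat) : (((mask >>> i) &&& 1) == 1) = mask.testBit i := by
  simp [Nat.testBit, Nat.and_comm]

-- `1.testBit i` is `i = 0`
lemma pv_testBit_one (i : Nat) : Nat.testBit 1 i = decide (i = 0) := by
  cases i with
  | zero => rfl
  | succ n => simp [Nat.testBit_succ]

-- `mask & r == r` says every bit of r is a bit of mask
lemma pv_and_eq_right (mask r : Nat) :
    (mask &&& r = r) ↔ ∀ j, r.testBit j = true → mask.testBit j = true := by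
  constructor
  · intro h j hj
    have := congrArg (Nat.testBit · j) h
    simp only [Nat.testBit_and] at this
    rw [← this] at hj
    exact (Bool.and_eq_true _ _ ▸ hj).1
  · intro h
    apply Nat.eq_of_testBit_eq
    intro j
    simp only [Nat.testBit_and]
    by_cases hj : r.testBit j
    · simp [hj, h j hj]
    · simp [hj]

-- membership in A's subset comprehension, for a duplicate-free elems
lemma pv_mem_sel (elems : List Int) (hnd : elems.Nodup) (mask : Nat) (y : Int) :
    (y ∈ (List.range elems.length).filterMap fun i =>
        if mask &&& (1 <<< i) != 0 then elems[i]? else none)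
      ↔ y ∈ elems ∧ mask.testBit (elems.idxOf y) = true := by
  simp only [List.mem_filterMap, List.mem_range, pv_bit1]
  constructor
  · rintro ⟨i, hi, hif⟩
    by_cases hb : mask.testBit i
    · simp only [hb, if_pos] at hif
      rw [List.getElem?_eq_getElem hi] at hif
      obtain rfl : elems[i] = y := by simpa using hif
      refine ⟨List.getElem_mem hi, ?_⟩
      rw [List.Nodup.idxOf_getElem hnd]
      exact hb
    · simp [hb] at hif
  · rintro ⟨hy, hb⟩
    refine ⟨elems.idxOf y, List.idxOf_lt_length_of_mem hy, ?_⟩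
    simp [hb, List.getElem?_eq_getElem (List.idxOf_lt_length_of_mem hy), List.getElem_idxOf]

-- A's inner check says: the subset is downward closed under `order`
lemma pv_downsetA_iff (order : List (Int × Int)) (S : PySem.Set Int) :
    pvDownsetA order S = true ↔ ∀ p ∈ order, p.2 ∈ S → p.1 ∈ S := by
  simp only [pvDownsetA, PySem.Set.contains_eq_listContains, List.contains_eq_mem, Bool.not_and,
    Bool.not_not, List.all_eq_true, Bool.or_eq_true, Bool.not_eq_eq_eq_not, Bool.not_true,
    beq_eq_false_iff_ne, ne_eq, decide_eq_true_eq, Prod.forall]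
  constructor
  · intro h a b hab h2
    rcases h b h2 a b hab with hne | hin
    · exact absurd rfl hne
    · exact hin
  · intro h x hx a b hab
    by_cases hbx : b = x
    · exact Or.inr (h a b hab (hbx ▸ hx))
    · exact Or.inl hbx

lemma pv_reqLoop_none (elements elems : List Int)
    (helems : ∀ a, a ∈ elements → a ∈ elems) (x : Int) (m : Nat)
    (ord : List (Int × Int)) :
    pvReqLoop elements elems x m ord = none ↔ ∃ p ∈ ord, p.2 = x ∧ p.1 ∉ elements := by
  induction ord generalizing m with
  | nil => simp [pvReqLoop]
  | cons p rest ih =>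
    obtain ⟨y, u⟩ := p
    simp only [pvReqLoop]
    by_cases hu : u = x
    · simp only [hu, beq_self_eq_true, if_pos]
      by_cases hy : y ∈ elements
      · have hc : elements.contains y = true := by simpa using hy
        rw [if_pos hc]
        obtain ⟨j, hj⟩ := Option.isSome_iff_exists.mp
          ((PySem.List.index?_isSome_iff elems y).mpr (helems y hy))
        rw [hj, ih]
        constructor
        · rintro ⟨q, hq, h1, h2⟩; exact ⟨q, List.mem_cons_of_mem _ hq, h1, h2⟩
        · rintro ⟨q, hq, h1, h2⟩
          rcases List.mem_cons.mp hq with rfl | hq'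
          · exact absurd hy h2
          · exact ⟨q, hq', h1, h2⟩
      · rw [if_neg (by simpa using hy)]
        simp only [true_iff]
        exact ⟨(y, x), List.mem_cons_self, rfl, hy⟩
    · rw [if_neg (by simpa using hu), ih]
      constructor
      · rintro ⟨q, hq, h1, h2⟩; exact ⟨q, List.mem_cons_of_mem _ hq, h1, h2⟩
      · rintro ⟨q, hq, h1, h2⟩
        rcases List.mem_cons.mp hq with rfl | hq'
        · exact absurd h1 hu
        · exact ⟨q, hq', h1, h2⟩

lemma pv_reqLoop_some (elements elems : List Int)
    (helems : ∀ a, a ∈ elements → a ∈ elems) (x : Int) (m v : Nat)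
    (ord : List (Int × Int)) (h : pvReqLoop elements elems x m ord = some v) (j : Nat) :
    v.testBit j = true ↔
      m.testBit j = true ∨ ∃ p ∈ ord, p.2 = x ∧ PySem.List.index? elems p.1 = some j := by
  induction ord generalizing m with
  | nil =>
    simp only [pvReqLoop, Option.some.injEq] at h
    subst h
    simp
  | cons p rest ih =>
    obtain ⟨y, u⟩ := p
    simp only [pvReqLoop] at h
    by_cases hu : u = x
    · rw [if_pos (by simpa using hu)] at h
      by_cases hy : y ∈ elements
      · rw [if_pos (by simpa using hy : elements.contains y = true)] at h
        obtain ⟨k, hk⟩ := Option.isSome_iff_exists.mp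
          ((PySem.List.index?_isSome_iff elems y).mpr (helems y hy))
        rw [hk] at h
        rw [ih _ h]
        simp only [Nat.testBit_or, Bool.or_eq_true, Nat.testBit_shiftLeft, pv_testBit_one]
        constructor
        · rintro ((hm | hbit) | ⟨q, hq, h1, h2⟩)
          · exact Or.inl hm
          · refine Or.inr ⟨(y, u), List.mem_cons_self, hu, ?_⟩
            obtain ⟨hge, hz⟩ := Bool.and_eq_true _ _ |>.mp hbit
            have h1 := of_decide_eq_true hge
            have h2 := of_decide_eq_true hz
            have : j = k := by omega
            rw [this, hk]
          · exact Or.inr ⟨q, List.mem_cons_of_mem _ hq, h1, h2⟩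
        · rintro (hm | ⟨q, hq, h1, h2⟩)
          · exact Or.inl (Or.inl hm)
          · rcases List.mem_cons.mp hq with rfl | hq'
            · left; right
              rw [hk] at h2
              obtain rfl : k = j := by simpa using h2
              simp
            · exact Or.inr ⟨q, hq', h1, h2⟩
      · rw [if_neg (by simpa using hy)] at h
        simp at h
    · rw [if_neg (by simpa using hu)] at h
      rw [ih _ h]
      constructor
      · rintro (hm | ⟨q, hq, h1, h2⟩)
        · exact Or.inl hm
        · exact Or.inr ⟨q, List.mem_cons_of_mem _ hq, h1, h2⟩
      · rintro (hm | ⟨q, hq, h1, h2⟩)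
        · exact Or.inl hm
        · rcases List.mem_cons.mp hq with rfl | hq'
          · exact absurd h1 hu
          · exact Or.inr ⟨q, hq', h1, h2⟩

-- with nodup elems, a successful elems.index names List.idxOf
lemma pv_index_eq_idxOf (elems : List Int) (hnd : elems.Nodup) (a : Int) (j : Nat)
    (hj : PySem.List.index? elems a = some j) : elems.idxOf a = j := by
  obtain ⟨hk, he, -⟩ := PySem.List.getElem_of_index?_eq_some hj
  rw [← he]
  exact List.Nodup.idxOf_getElem hnd _ hk

-- A's per-mask boolean, as a proposition about bits of the mask
lemma pv_A_iff (elems : List Int) (order : List (Int × Int)) (hnd : elems.Nodup) (mask : Nat) :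
    (pvDownsetA order (PySem.Set.ofList ((List.range elems.length).filterMap fun i =>
        if mask &&& (1 <<< i) != 0 then elems[i]? else none)) = true)
      ↔ ∀ p ∈ order, (p.2 ∈ elems ∧ mask.testBit (elems.idxOf p.2) = true) →
          (p.1 ∈ elems ∧ mask.testBit (elems.idxOf p.1) = true) := by
  have hS : ∀ y : Int, (y ∈ PySem.Set.ofList ((List.range elems.length).filterMap fun i =>
      if mask &&& (1 <<< i) != 0 then elems[i]? else none))
      ↔ (y ∈ elems ∧ mask.testBit (elems.idxOf y) = true) := by
    intro y
    rw [PySem.Set.mem_ofList]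
    exact pv_mem_sel elems hnd mask y
  rw [pv_downsetA_iff]
  constructor
  · intro h p hp h2
    exact (hS p.1).mp (h p hp ((hS p.2).mpr h2))
  · intro h p hp h2
    exact (hS p.1).mpr (h p hp ((hS p.2).mp h2))

-- B's per-mask boolean, as the same proposition
lemma pv_B_iff (elements elems : List Int) (order : List (Int × Int))
    (hnd : elems.Nodup) (hmem : ∀ a, a ∈ elems ↔ a ∈ elements) (mask : Nat) :
    (pvOkB (elems.map fun x => pvReqLoop elements elems x 0 order) mask = true)
      ↔ ∀ p ∈ order, (p.2 ∈ elems ∧ mask.testBit (elems.idxOf p.2) = true) →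
          (p.1 ∈ elems ∧ mask.testBit (elems.idxOf p.1) = true) := by
  have helems : ∀ a, a ∈ elements → a ∈ elems := fun a ha => (hmem a).mpr ha
  simp only [pvOkB, List.all_eq_true]
  constructor
  · intro hB p hp h2
    obtain ⟨hp2, hb2⟩ := h2
    have hilt : elems.idxOf p.2 < elems.length := List.idxOf_lt_length_of_mem hp2
    have hiltm : elems.idxOf p.2 < (elems.map fun x => pvReqLoop elements elems x 0 order).length := by
      simpa using hilt
    have hz : ((elems.map fun x => pvReqLoop elements elems x 0 order)[elems.idxOf p.2],
        elems.idxOf p.2) ∈ (elems.map fun x => pvReqLoop elements elems x 0 order).zipIdx := by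
      rw [List.mem_zipIdx_iff_getElem?]
      exact List.getElem?_eq_getElem hiltm
    have hr := hB _ hz
    rw [List.getElem_map, List.getElem_idxOf hilt] at hr
    simp only [pv_bit2] at hr
    cases hreq : pvReqLoop elements elems p.2 0 order with
    | none =>
      rw [hreq] at hr
      simp [hb2] at hr
    | some v =>
      rw [hreq] at hr
      have hv : mask &&& v = v := by
        simp only [hb2, Bool.true_and, Bool.not_eq_eq_eq_not, Bool.not_true] at hr
        simpa using hr
      have hnn : ¬ ∃ q ∈ order, q.2 = p.2 ∧ q.1 ∉ elements := by
        rw [← pv_reqLoop_none elements elems helems p.2 0 order, hreq]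
        simp
      push Not at hnn
      have hp1 : p.1 ∈ elements := hnn p hp rfl
      have hp1' : p.1 ∈ elems := helems _ hp1
      obtain ⟨j, hj⟩ := Option.isSome_iff_exists.mp
        ((PySem.List.index?_isSome_iff elems p.1).mpr hp1')
      have hvb : v.testBit j = true := by
        rw [pv_reqLoop_some elements elems helems p.2 0 v order hreq j]
        exact Or.inr ⟨p, hp, rfl, hj⟩
      have := (pv_and_eq_right mask v).mp hv j hvb
      rw [pv_index_eq_idxOf elems hnd p.1 j hj]
      exact ⟨hp1', this⟩
  · intro hQ ri hri
    obtain ⟨r, i⟩ := ri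
    rw [List.mem_zipIdx_iff_getElem?] at hri
    have hilt : i < (elems.map fun x => pvReqLoop elements elems x 0 order).length :=
      List.getElem?_eq_some_iff.mp hri |>.choose
    have hilt' : i < elems.length := by simpa using hilt
    have hrval : pvReqLoop elements elems elems[i] 0 order = r := by
      rw [List.getElem?_eq_getElem hilt, List.getElem_map] at hri
      exact Option.some_inj.mp hri
    simp only [pv_bit2]
    by_cases hbit : mask.testBit i
    · have hmemi : elems[i] ∈ elems := List.getElem_mem hilt'
      have hidx : elems.idxOf elems[i] = i := List.Nodup.idxOf_getElem hnd _ hilt'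
      cases hr : r with
      | none =>
        exfalso
        rw [hr] at hrval
        obtain ⟨q, hq, hq2, hq1⟩ :=
          (pv_reqLoop_none elements elems helems elems[i] 0 order).mp hrval
        have := hQ q hq ⟨hq2 ▸ hmemi, by rw [hq2, hidx]; exact hbit⟩
        exact hq1 ((hmem q.1).mp this.1)
      | some v =>
        have hvm : mask &&& v = v := by
          apply (pv_and_eq_right mask v).mpr
          intro j hj
          rw [hr] at hrval
          rw [pv_reqLoop_some elements elems helems elems[i] 0 v order hrval j] at hj
          rcases hj with hz | ⟨q, hq, hq2, hq1⟩
          · simp [Nat.zero_testBit] at hz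
          · have hq1mem : q.1 ∈ elems := by
              have := PySem.List.index?_isSome_iff elems q.1 |>.mp (by rw [hq1]; rfl)
              exact this
            have := hQ q hq ⟨hq2 ▸ hmemi, by rw [hq2, hidx]; exact hbit⟩
            rw [pv_index_eq_idxOf elems hnd q.1 j hq1] at this
            exact this.2
        simp [hbit, hvm]
    · simp [hbit]

-- the per-mask booleans of the two ports agree on a duplicate-free elems
lemma pv_mask_eq (elements elems : List Int) (order : List (Int × Int))
    (hnd : elems.Nodup) (hmem : ∀ a, a ∈ elems ↔ a ∈ elements) (mask : Nat) :
    pvDownsetA order (PySem.Set.ofList ((List.range elems.length).filterMap fun i =>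
        if mask &&& (1 <<< i) != 0 then elems[i]? else none))
      = pvOkB (elems.map fun x => pvReqLoop elements elems x 0 order) mask := by
  rw [Bool.eq_iff_iff, pv_A_iff elems order hnd mask,
    pv_B_iff elements elems order hnd hmem mask]

-- ===== VERDICT (by name: the statement is the Claim_ definition above) =====
theorem count_downsets_py_spec : Claim_equal_count_downsets_py := by
  intro elements order _ hpre
  show count_downsets_py elements order = count_downsets_py_alt elements order
  have hperm := PySem.List.sorted_perm elements (fun v : Int => v) false
  have hnd : (PySem.List.sorted elements (fun v : Int => v)).Nodup := hperm.nodup_iff.mpr hpre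
  have hmem : ∀ a, a ∈ PySem.List.sorted elements (fun v : Int => v) ↔ a ∈ elements :=
    fun a => hperm.mem_iff
  simp only [count_downsets_py, count_downsets_py_alt]
  by_cases h0 : PySem.List.sorted elements (fun v : Int => v) = []
  · rw [h0]
    rfl
  · have h0' : elements ≠ [] := fun h => h0 (by rw [h]; rfl)
    rw [if_neg (by simpa using h0')]
    exact PySem.List.foldl_congr_mem' _ _ _ _ (fun mask _ acc => by
      rw [pv_mask_eq elements _ order hnd hmem mask])
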